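-- pv_equiv track=rewrite | github.com/TomasDolejsek/Learning-Python | 04 Practicing Algorithms with Python/05 Learning Progress Tracker/tracker.py | what_to_display
-- ===== SOURCE A (Python) =====
-- def what_to_display(compare, some_ity):
--     new_ity = some_ity
--     if all(map(lambda x: x == 0, some_ity.values())):  # some_ity dict is empty
--         text = 'n/a'
--         return text, new_ity
--     some_ity = dict(filter(lambda x: x[1] == compare, some_ity.items()))
--     for key in some_ity:
--         del new_ity[key]
--     text = ', '.join(some_ity.keys())
--     return text, new_ity
-- ===== SOURCE B (Python) =====
-- def what_to_display(compare, some_ity):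
--     if all(v == 0 for v in some_ity.values()):
--         return 'n/a', some_ity
--     text = None
--     kept = {}
--     for key, value in some_ity.items():
--         if value == compare:
--             text = key if text is None else text + ', ' + key
--         else:
--             kept[key] = value
--     return ('' if text is None else text), kept
-- ===== Notes on version B (the rewrite author's own statement) =====
-- stated objective: alternative
-- what changed: B abandons A's mutate-in-place strategy (build a filtered dict, delete its keys from the original, join the keys at the end): it makes one functional pass that grows the display text incrementally in an Optional string accumulator (no key list, no join) and builds the complement dict fresh by insertion (no deletion); note B does not mutate the argument dict, the equivalence is about the return value.
import Mathlib
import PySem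

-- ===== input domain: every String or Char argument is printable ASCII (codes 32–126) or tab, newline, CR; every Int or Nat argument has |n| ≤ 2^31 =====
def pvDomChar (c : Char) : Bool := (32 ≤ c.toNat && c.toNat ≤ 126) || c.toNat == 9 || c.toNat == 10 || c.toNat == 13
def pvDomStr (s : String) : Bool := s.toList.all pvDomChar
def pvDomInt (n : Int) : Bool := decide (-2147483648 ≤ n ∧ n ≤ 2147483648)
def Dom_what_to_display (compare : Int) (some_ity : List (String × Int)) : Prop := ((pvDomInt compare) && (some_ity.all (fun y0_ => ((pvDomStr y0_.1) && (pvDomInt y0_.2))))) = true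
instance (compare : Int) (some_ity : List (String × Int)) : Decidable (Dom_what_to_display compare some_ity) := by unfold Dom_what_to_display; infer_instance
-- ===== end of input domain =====

-- B abandons A's mutate-in-place strategy (filtered dict + delete loop + join): one functional
-- pass grows the display text in an Optional string accumulator and builds the complement dict
-- fresh by insertion. B does not mutate the argument dict (A does); the equivalence proved here
-- is about the RETURN value.

-- ===== PORT A =====
def what_to_display (compare : Int) (some_ity : List (String × Int)) : String × (List (String × Int)) :=
  -- new_ity = some_ity (alias; the dict is its association list)
  let new_ity := some_ity
  -- if all(map(lambda x: x == 0, some_ity.values())): return 'n/a', new_ity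
  if some_ity.all (fun x => x.2 == 0) then
    ("n/a", new_ity)
  else
    -- some_ity = dict(filter(lambda x: x[1] == compare, some_ity.items()))
    let filtered := some_ity.filter (fun x => x.2 == compare)
    -- for key in some_ity: del new_ity[key]   (del = remove the first pair with that key)
    let new_ity := filtered.foldl (fun acc p => acc.eraseP (fun q => q.1 == p.1)) new_ity
    -- text = ', '.join(some_ity.keys())
    (PySem.Str.join ", " (filtered.map (fun p => p.1)), new_ity)

-- ===== PORT B =====
def what_to_display_alt (compare : Int) (some_ity : List (String × Int)) : String × (List (String × Int)) :=
  -- if all(v == 0 for v in some_ity.values()): return 'n/a', some_ity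
  if some_ity.all (fun x => x.2 == 0) then
    ("n/a", some_ity)
  else
    -- text = None; kept = {}; for key, value in some_ity.items(): …
    let st := some_ity.foldl
      (fun (st : Option String × PySem.Dict String Int) p =>
        if p.2 == compare then
          -- text = key if text is None else text + ', ' + key
          (some (match st.1 with | none => p.1 | some t => t ++ ", " ++ p.1), st.2)
        else
          -- kept[key] = value
          (st.1, st.2.insert p.1 p.2))
      (none, PySem.Dict.empty)
    -- return ('' if text is None else text), kept
    (st.1.getD "", st.2.items)

-- ===== PRECONDITION & SPEC =====
-- Pre_ excludes association lists with duplicate keys: they do not represent any Python dict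
-- (A's parameter is a dict, whose keys are always distinct), so nothing is claimed there.
def Pre_what_to_display (compare : Int) (some_ity : List (String × Int)) : Prop :=
  (some_ity.map Prod.fst).Nodup
instance (compare : Int) (some_ity : List (String × Int)) : Decidable (Pre_what_to_display compare some_ity) := by unfold Pre_what_to_display; infer_instance

def pvWitness_what_to_display : Int × (List (String × Int)) := (2, [("alice", 2), ("bob", 1)])

def Spec_what_to_display (compare : Int) (some_ity : List (String × Int)) (out : String × (List (String × Int))) : Prop := out = what_to_display_alt compare some_ity
instance (compare : Int) (some_ity : List (String × Int)) (out : String × (List (String × Int))) : Decidable (Spec_what_to_display compare some_ity out) := by unfold Spec_what_to_display; infer_instance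

-- ===== CLAIM (what is proved, stated in full; the proofs are below) =====
def Claim_equal_what_to_display : Prop := ∀ (compare : Int) (some_ity : List (String × Int)), Dom_what_to_display compare some_ity → Pre_what_to_display compare some_ity → Spec_what_to_display compare some_ity (what_to_display compare some_ity)

-- ===== LEMMAS AND PROOFS =====

-- Incremental text accumulation, abstracted: J t ks runs B's text update over the keys ks.
def pvJ (t : Option String) (ks : List String) : Option String :=
  ks.foldl (fun t k => some (match t with | none => k | some s => s ++ ", " ++ k)) t

theorem pvJ_some (ks : List String) : ∀ (s : String),
    pvJ (some s) ks = some (PySem.Str.join ", " (s :: ks)) := by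
  induction ks with
  | nil => intro s; simp [pvJ, PySem.Str.join, PySem.Chars.join, List.intercalate]
  | cons k ks ih =>
    intro s
    show pvJ (some (s ++ ", " ++ k)) ks = _
    rw [ih]
    congr 1
    apply String.ext
    cases ks with
    | nil => simp [PySem.Str.join, PySem.Chars.join, List.intercalate, List.intersperse]
    | cons k2 rest =>
      simp [PySem.Str.join, PySem.Chars.join, List.intercalate, List.intersperse, List.append_assoc]

theorem pvJ_none_getD (ks : List String) :
    (pvJ none ks).getD "" = PySem.Str.join ", " ks := by
  cases ks with
  | nil => simp [pvJ, PySem.Str.join, PySem.Chars.join, List.intercalate]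
  | cons k ks =>
    show ((pvJ (some k) ks).getD "") = _
    rw [pvJ_some]
    rfl

-- B's fold, characterised: the text is the J-accumulation of the matched keys, and the dict's
-- items are the kept pairs appended (keys fresh and distinct throughout).
theorem alt_foldl_char (compare : Int) :
    ∀ (xs : List (String × Int)) (t : Option String) (d : PySem.Dict String Int),
      d.keys.Nodup → (∀ p ∈ xs, d.contains p.1 = false) → (xs.map Prod.fst).Nodup →
      xs.foldl
        (fun (st : Option String × PySem.Dict String Int) p =>
          if p.2 == compare then
            (some (match st.1 with | none => p.1 | some t => t ++ ", " ++ p.1), st.2)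
          else
            (st.1, st.2.insert p.1 p.2))
        (t, d)
      = (pvJ t ((xs.filter (fun p => p.2 == compare)).map (fun p => p.1)),
         PySem.Dict.mk (d.items ++ xs.filter (fun p => !(p.2 == compare)))) := by
  intro xs
  induction xs with
  | nil =>
    intro t d _ _ _
    simp [pvJ]
  | cons x xs ih =>
    intro t d hnd hfresh hxs
    simp only [List.map_cons, List.nodup_cons] at hxs
    rw [List.foldl_cons, List.filter_cons, List.filter_cons]
    by_cases h : x.2 = compare
    · rw [if_pos (by simp [h])]
      rw [ih _ d hnd (fun p hp => hfresh p (List.mem_cons_of_mem _ hp)) hxs.2]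
      simp [h, pvJ]
    · rw [if_neg (by simp [h])]
      have hx : d.contains x.1 = false := hfresh x (List.mem_cons_self)
      have hnd' : (d.insert x.1 x.2).keys.Nodup := PySem.Dict.nodup_keys_insert _ _ _ hnd
      have hfresh' : ∀ p ∈ xs, (d.insert x.1 x.2).contains p.1 = false := by
        intro p hp
        rw [PySem.Dict.contains_insert]
        have : p.1 ≠ x.1 := by
          intro hEq
          exact hxs.1 (hEq ▸ List.mem_map_of_mem hp)
        simp [this, hfresh p (List.mem_cons_of_mem _ hp)]
      rw [ih _ _ hnd' hfresh' hxs.2]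
      rw [PySem.Dict.items_insert_of_not_contains _ _ hx]
      simp [h]

-- With distinct keys, deleting the first pair with key `a` is filtering that key out.
theorem eraseP_key_eq_filter (a : String) :
    ∀ (xs : List (String × Int)), (xs.map Prod.fst).Nodup →
      xs.eraseP (fun q => q.1 == a) = xs.filter (fun q => !(q.1 == a)) := by
  intro xs
  induction xs with
  | nil => intro _; rfl
  | cons x xs ih =>
    intro hnd
    simp only [List.map_cons, List.nodup_cons] at hnd
    by_cases h : x.1 = a
    · subst h
      have : xs.filter (fun q => !(q.1 == x.1)) = xs := by
        apply List.filter_eq_self.2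
        intro q hq
        simp only [Bool.not_eq_eq_eq_not, Bool.not_true, beq_eq_false_iff_ne, ne_eq]
        intro hEq
        exact hnd.1 (hEq ▸ List.mem_map_of_mem hq)
      simp [this]
    · simp [h, ih hnd.2]

-- A's delete loop: folding `del` over the keys of ys filters out exactly those keys.
theorem foldl_eraseP_eq_filter :
    ∀ (ys xs : List (String × Int)), (xs.map Prod.fst).Nodup →
      ys.foldl (fun acc p => acc.eraseP (fun q => q.1 == p.1)) xs
      = xs.filter (fun q => !((ys.map Prod.fst).contains q.1)) := by
  intro ys
  induction ys with
  | nil => intro xs _; simp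
  | cons y ys ih =>
    intro xs hnd
    rw [List.foldl_cons, eraseP_key_eq_filter y.1 xs hnd]
    have hnd' : ((xs.filter (fun q => !(q.1 == y.1))).map Prod.fst).Nodup :=
      List.Nodup.sublist (List.Sublist.map Prod.fst (List.filter_sublist (l := xs))) hnd
    rw [ih _ hnd', List.filter_filter]
    apply List.filter_congr
    intro q _
    simp only [List.map_cons, List.contains_cons]
    by_cases h : q.1 = y.1 <;> simp [h, Bool.and_comm]

-- Deleting the matched keys from the original list keeps exactly the non-matching pairs.
theorem delete_matched_eq_keep (compare : Int) (xs : List (String × Int))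
    (hnd : (xs.map Prod.fst).Nodup) :
    (xs.filter (fun p => p.2 == compare)).foldl
        (fun acc p => acc.eraseP (fun q => q.1 == p.1)) xs
      = xs.filter (fun p => !(p.2 == compare)) := by
  rw [foldl_eraseP_eq_filter _ xs hnd]
  apply List.filter_congr
  intro q hq
  by_cases h : q.2 = compare
  · have hmem : q.1 ∈ (xs.filter (fun p => p.2 == compare)).map Prod.fst :=
      List.mem_map_of_mem (List.mem_filter.2 ⟨hq, by simp [h]⟩)
    simp [hmem, h]
  · have hmem : q.1 ∉ (xs.filter (fun p => p.2 == compare)).map Prod.fst := by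
      intro hin
      obtain ⟨r, hr, hkey⟩ := List.mem_map.1 hin
      have hrx := List.mem_filter.1 hr
      have hqr : q = r :=
        (List.nodup_map_iff_inj_on (List.Nodup.of_map Prod.fst hnd)).mp hnd q hq r hrx.1 hkey.symm
      exact h (by simpa [hqr] using hrx.2)
    simp [hmem, h]

-- ===== VERDICT (by name: the statement is the Claim_ definition above) =====
theorem what_to_display_spec : Claim_equal_what_to_display := by
  intro compare some_ity _ hpre
  unfold Spec_what_to_display what_to_display what_to_display_alt
  by_cases hall : some_ity.all (fun x => x.2 == 0)
  · simp [hall]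
  · simp only [hall]
    rw [alt_foldl_char compare some_ity none PySem.Dict.empty
          (by simp) (by simp) hpre]
    rw [delete_matched_eq_keep compare some_ity hpre]
    simp [pvJ_none_getD, PySem.Dict.empty]
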